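-- pv_equiv track=rewrite | github.com/erik9691/Ecommerce-algoritmos | ecommerce.py | aMinusculas
-- ===== SOURCE A (Python) =====
-- def aMinusculas(texto):
--
--     resultado = ""
--
--     for caracter in texto:
--         if caracter == "A":
--             resultado = resultado + "a"
--         elif caracter == "B":
--             resultado = resultado + "b"
--         elif caracter == "C":
--             resultado = resultado + "c"
--         elif caracter == "D":
--             resultado = resultado + "d"
--         elif caracter == "E":
--             resultado = resultado + "e"
--         elif caracter == "F":
--             resultado = resultado + "f"
--         elif caracter == "G":
--             resultado = resultado + "g"
--         elif caracter == "H":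
--             resultado = resultado + "h"
--         elif caracter == "I":
--             resultado = resultado + "i"
--         elif caracter == "J":
--             resultado = resultado + "j"
--         elif caracter == "K":
--             resultado = resultado + "k"
--         elif caracter == "L":
--             resultado = resultado + "l"
--         elif caracter == "M":
--             resultado = resultado + "m"
--         elif caracter == "N":
--             resultado = resultado + "n"
--         elif caracter == "O":
--             resultado = resultado + "o"
--         elif caracter == "P":
--             resultado = resultado + "p"
--         elif caracter == "Q":
--             resultado = resultado + "q"
--         elif caracter == "R":
--             resultado = resultado + "r"
--         elif caracter == "S":
--             resultado = resultado + "s"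
--         elif caracter == "T":
--             resultado = resultado + "t"
--         elif caracter == "U":
--             resultado = resultado + "u"
--         elif caracter == "V":
--             resultado = resultado + "v"
--         elif caracter == "W":
--             resultado = resultado + "w"
--         elif caracter == "X":
--             resultado = resultado + "x"
--         elif caracter == "Y":
--             resultado = resultado + "y"
--         elif caracter == "Z":
--             resultado = resultado + "z"
--         else:
--             resultado = resultado + caracter
--
--     return resultado
-- ===== SOURCE B (Python) =====
-- def aMinusculas(texto):
--     return "".join(chr(ord(c) + 32) if "A" <= c <= "Z" else c for c in texto)
-- ===== Notes on version B (the rewrite author's own statement) =====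
-- stated objective: simpler
-- what changed: Replaced the 26-branch if/elif lookup with closed-form code-point arithmetic (offset +32 for 'A'..'Z') in a single join over a generator, avoiding repeated string concatenation.
import Mathlib
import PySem

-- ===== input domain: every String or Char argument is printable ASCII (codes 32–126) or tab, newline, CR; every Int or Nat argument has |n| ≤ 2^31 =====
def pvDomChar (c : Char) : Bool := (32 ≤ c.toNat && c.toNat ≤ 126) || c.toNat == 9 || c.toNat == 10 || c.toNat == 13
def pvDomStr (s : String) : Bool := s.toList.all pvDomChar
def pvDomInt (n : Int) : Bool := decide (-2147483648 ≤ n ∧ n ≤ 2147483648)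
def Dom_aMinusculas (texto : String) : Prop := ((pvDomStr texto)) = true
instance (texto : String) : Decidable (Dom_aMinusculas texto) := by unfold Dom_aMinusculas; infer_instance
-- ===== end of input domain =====

-- B replaces A's 26-branch if/elif ladder by closed-form code-point arithmetic ('A'..'Z' ↦ +32); objective: simpler.

-- ===== PORT A =====
-- one iteration of A's loop body: the 26-branch if/elif chain appending to `resultado`
def aStep (resultado : List Char) (caracter : Char) : List Char :=
  if caracter = 'A' then resultado ++ ['a']
  else if caracter = 'B' then resultado ++ ['b']
  else if caracter = 'C' then resultado ++ ['c']
  else if caracter = 'D' then resultado ++ ['d']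
  else if caracter = 'E' then resultado ++ ['e']
  else if caracter = 'F' then resultado ++ ['f']
  else if caracter = 'G' then resultado ++ ['g']
  else if caracter = 'H' then resultado ++ ['h']
  else if caracter = 'I' then resultado ++ ['i']
  else if caracter = 'J' then resultado ++ ['j']
  else if caracter = 'K' then resultado ++ ['k']
  else if caracter = 'L' then resultado ++ ['l']
  else if caracter = 'M' then resultado ++ ['m']
  else if caracter = 'N' then resultado ++ ['n']
  else if caracter = 'O' then resultado ++ ['o']
  else if caracter = 'P' then resultado ++ ['p']
  else if caracter = 'Q' then resultado ++ ['q']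
  else if caracter = 'R' then resultado ++ ['r']
  else if caracter = 'S' then resultado ++ ['s']
  else if caracter = 'T' then resultado ++ ['t']
  else if caracter = 'U' then resultado ++ ['u']
  else if caracter = 'V' then resultado ++ ['v']
  else if caracter = 'W' then resultado ++ ['w']
  else if caracter = 'X' then resultado ++ ['x']
  else if caracter = 'Y' then resultado ++ ['y']
  else if caracter = 'Z' then resultado ++ ['z']
  else resultado ++ [caracter]

def aMinusculas (texto : String) : String :=
  String.ofList (texto.toList.foldl aStep [])

-- ===== PORT B =====
-- closed-form per-character lowering: chr(ord(c) + 32) for 'A' <= c <= 'Z'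
def bLower (c : Char) : Char :=
  if 'A' ≤ c ∧ c ≤ 'Z' then Char.ofNat (c.toNat + 32) else c

def aMinusculas_alt (texto : String) : String :=
  String.ofList (texto.toList.map bLower)

-- ===== PRECONDITION & SPEC =====
def Spec_aMinusculas (texto : String) (out : String) : Prop := out = aMinusculas_alt texto
instance (texto : String) (out : String) : Decidable (Spec_aMinusculas texto out) := by unfold Spec_aMinusculas; infer_instance

-- ===== CLAIM (what is proved, stated in full; the proofs are below) =====
def Claim_equal_aMinusculas : Prop := ∀ (texto : String), Dom_aMinusculas texto → Spec_aMinusculas texto (aMinusculas texto)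

-- ===== LEMMAS AND PROOFS =====

-- A's branch chain appends exactly B's lowered character
theorem aStep_eq (resultado : List Char) (caracter : Char) :
    aStep resultado caracter = resultado ++ [bLower caracter] := by
  by_cases h1 : caracter = 'A'
  · subst h1; rfl
  by_cases h2 : caracter = 'B'
  · subst h2; rfl
  by_cases h3 : caracter = 'C'
  · subst h3; rfl
  by_cases h4 : caracter = 'D'
  · subst h4; rfl
  by_cases h5 : caracter = 'E'
  · subst h5; rfl
  by_cases h6 : caracter = 'F'
  · subst h6; rfl
  by_cases h7 : caracter = 'G'
  · subst h7; rfl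
  by_cases h8 : caracter = 'H'
  · subst h8; rfl
  by_cases h9 : caracter = 'I'
  · subst h9; rfl
  by_cases h10 : caracter = 'J'
  · subst h10; rfl
  by_cases h11 : caracter = 'K'
  · subst h11; rfl
  by_cases h12 : caracter = 'L'
  · subst h12; rfl
  by_cases h13 : caracter = 'M'
  · subst h13; rfl
  by_cases h14 : caracter = 'N'
  · subst h14; rfl
  by_cases h15 : caracter = 'O'
  · subst h15; rfl
  by_cases h16 : caracter = 'P'
  · subst h16; rfl
  by_cases h17 : caracter = 'Q'
  · subst h17; rfl
  by_cases h18 : caracter = 'R'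
  · subst h18; rfl
  by_cases h19 : caracter = 'S'
  · subst h19; rfl
  by_cases h20 : caracter = 'T'
  · subst h20; rfl
  by_cases h21 : caracter = 'U'
  · subst h21; rfl
  by_cases h22 : caracter = 'V'
  · subst h22; rfl
  by_cases h23 : caracter = 'W'
  · subst h23; rfl
  by_cases h24 : caracter = 'X'
  · subst h24; rfl
  by_cases h25 : caracter = 'Y'
  · subst h25; rfl
  by_cases h26 : caracter = 'Z'
  · subst h26; rfl
  -- none of the 26 letters matched, so B's range test 'A' ≤ caracter ≤ 'Z' must be false too
  unfold aStep bLower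
  rw [if_neg h1, if_neg h2, if_neg h3, if_neg h4, if_neg h5, if_neg h6, if_neg h7, if_neg h8, if_neg h9, if_neg h10, if_neg h11, if_neg h12, if_neg h13, if_neg h14, if_neg h15, if_neg h16, if_neg h17, if_neg h18, if_neg h19, if_neg h20, if_neg h21, if_neg h22, if_neg h23, if_neg h24, if_neg h25, if_neg h26, if_neg]
  rintro ⟨hlo, hhi⟩
  rw [Char.le_def] at hlo hhi
  have hlo' : 65 ≤ caracter.toNat := UInt32.le_iff_toNat_le.mp hlo
  have hhi' : caracter.toNat ≤ 90 := UInt32.le_iff_toNat_le.mp hhi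
  have k : ∀ (d : Char) (n : Nat), caracter ≠ d → d.toNat = n → caracter.toNat ≠ n :=
    fun d n hd he h => hd (Char.ext (UInt32.toNat_inj.mp (h.trans he.symm)))
  have n1 := k 'A' 65 h1 rfl
  have n2 := k 'B' 66 h2 rfl
  have n3 := k 'C' 67 h3 rfl
  have n4 := k 'D' 68 h4 rfl
  have n5 := k 'E' 69 h5 rfl
  have n6 := k 'F' 70 h6 rfl
  have n7 := k 'G' 71 h7 rfl
  have n8 := k 'H' 72 h8 rfl
  have n9 := k 'I' 73 h9 rfl
  have n10 := k 'J' 74 h10 rfl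
  have n11 := k 'K' 75 h11 rfl
  have n12 := k 'L' 76 h12 rfl
  have n13 := k 'M' 77 h13 rfl
  have n14 := k 'N' 78 h14 rfl
  have n15 := k 'O' 79 h15 rfl
  have n16 := k 'P' 80 h16 rfl
  have n17 := k 'Q' 81 h17 rfl
  have n18 := k 'R' 82 h18 rfl
  have n19 := k 'S' 83 h19 rfl
  have n20 := k 'T' 84 h20 rfl
  have n21 := k 'U' 85 h21 rfl
  have n22 := k 'V' 86 h22 rfl
  have n23 := k 'W' 87 h23 rfl
  have n24 := k 'X' 88 h24 rfl
  have n25 := k 'Y' 89 h25 rfl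
  have n26 := k 'Z' 90 h26 rfl
  omega

theorem foldl_aStep (l : List Char) (acc : List Char) :
    l.foldl aStep acc = acc ++ l.map bLower := by
  induction l generalizing acc with
  | nil => simp
  | cons c t ih => simp [List.foldl, aStep_eq, ih]

-- ===== VERDICT (by name: the statement is the Claim_ definition above) =====
theorem aMinusculas_spec : Claim_equal_aMinusculas := by
  intro texto _
  unfold Spec_aMinusculas aMinusculas aMinusculas_alt
  rw [foldl_aStep]
  simp
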